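-- pv_equiv track=rewrite | github.com/davidiach/erdos97 | src/erdos97/min_radius_filter.py | _angular_witness_order_from_positions
-- ===== SOURCE A (Python) =====
-- from typing import Sequence
--
-- def _angular_witness_order_from_positions(
--     pos: dict[int, int],
--     n: int,
--     center: int,
--     witnesses: Sequence[int],
-- ) -> list[int]:
--     """Return witness order using prevalidated cyclic-order positions."""
--
--     if center not in pos:
--         raise ValueError(f"center {center} is missing from cyclic order")
--     missing = [witness for witness in witnesses if witness not in pos]
--     if missing:
--         raise ValueError(f"witness {missing[0]} is missing from cyclic order")
--     center_pos = pos[center]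
--     return sorted(witnesses, key=lambda witness: (pos[witness] - center_pos) % n)
-- ===== SOURCE B (Python) =====
-- def _angular_witness_order_from_positions(
--     pos,
--     n,
--     center,
--     witnesses,
-- ):
--     """Return witness order using prevalidated cyclic-order positions."""
--
--     if center not in pos:
--         raise ValueError(f"center {center} is missing from cyclic order")
--     for witness in witnesses:
--         if witness not in pos:
--             raise ValueError(f"witness {witness} is missing from cyclic order")
--     center_pos = pos[center]
--     buckets = {}
--     for witness in witnesses:
--         buckets.setdefault((pos[witness] - center_pos) % n, []).append(witness)
--     out = []
--     for r in sorted(buckets):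
--         out.extend(buckets[r])
--     return out
-- ===== Notes on version B (the rewrite author's own statement) =====
-- stated objective: alternative
-- what changed: Replaces the key-decorated comparison sort of all witnesses by hash-grouping witnesses into residue buckets (dict, insertion order kept) and sorting only the distinct residues, then flattening the buckets in ascending residue order; validation raising is unchanged.
import Mathlib
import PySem

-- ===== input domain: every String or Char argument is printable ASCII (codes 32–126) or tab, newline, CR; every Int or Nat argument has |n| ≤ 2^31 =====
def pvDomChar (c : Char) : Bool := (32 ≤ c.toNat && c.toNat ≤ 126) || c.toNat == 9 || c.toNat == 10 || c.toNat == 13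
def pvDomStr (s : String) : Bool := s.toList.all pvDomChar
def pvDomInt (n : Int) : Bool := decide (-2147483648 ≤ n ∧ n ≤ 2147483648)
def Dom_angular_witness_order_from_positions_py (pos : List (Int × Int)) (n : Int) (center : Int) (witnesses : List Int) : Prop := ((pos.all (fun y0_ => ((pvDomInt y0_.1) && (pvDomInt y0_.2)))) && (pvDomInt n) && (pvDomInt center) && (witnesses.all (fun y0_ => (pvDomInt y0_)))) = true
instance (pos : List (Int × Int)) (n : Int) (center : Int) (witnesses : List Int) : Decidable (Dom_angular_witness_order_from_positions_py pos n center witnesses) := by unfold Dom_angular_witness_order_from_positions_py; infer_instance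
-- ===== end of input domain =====

-- B replaces A's comparison sort of all witnesses by dict-bucketing on the residue key
-- and sorting only the distinct residues (alternative algorithm, same exact output).

-- ===== PORT A =====
-- dict lookup on the association list (first match): A's 'pos[k]' / 'k in pos'
def dictGet? (pos : List (Int × Int)) (k : Int) : Option Int :=
  (pos.find? (fun p => p.1 == k)).map (·.2)

def angular_witness_order_from_positions_py (pos : List (Int × Int)) (n : Int) (center : Int) (witnesses : List Int) : List Int :=
  match dictGet? pos center with
  | none => []          -- Python: raise ValueError (excluded by Pre_)
  | some center_pos =>
    let missing := witnesses.filter (fun w => (dictGet? pos w).isNone)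
    if missing ≠ [] then []   -- Python: raise ValueError (excluded by Pre_)
    else PySem.List.sorted witnesses
      (fun w => PySem.Int.mod ((dictGet? pos w).getD 0 - center_pos) n)

-- ===== PORT B =====
-- B's own dict lookup, as structural recursion over the association list
def lookupPos : List (Int × Int) → Int → Option Int
  | [], _ => none
  | (k, v) :: rest, x => if k == x then some v else lookupPos rest x

-- B's bucket-building loop: append each witness to the bucket of its residue key
def bucketize (key : Int → Int) : List Int → PySem.Dict Int (List Int) → PySem.Dict Int (List Int)
  | [], d => d
  | w :: ws, d => bucketize key ws (d.modify (key w) [] (· ++ [w]))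

-- B's flattening loop: concatenate the buckets of the given residues in order
def flattenBuckets (d : PySem.Dict Int (List Int)) : List Int → List Int
  | [] => []
  | r :: rs => d.getD r [] ++ flattenBuckets d rs

def angular_witness_order_from_positions_py_alt (pos : List (Int × Int)) (n : Int) (center : Int) (witnesses : List Int) : List Int :=
  match lookupPos pos center with
  | none => []          -- Python: raise ValueError (excluded by Pre_)
  | some cp =>
    if witnesses.any (fun w => (lookupPos pos w).isNone) then []  -- raise at first missing witness
    else
      let d := bucketize (fun w => PySem.Int.mod ((lookupPos pos w).getD 0 - cp) n)
                 witnesses PySem.Dict.empty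
      flattenBuckets d (PySem.List.sorted d.keys (fun r => r))

-- ===== PRECONDITION & SPEC =====
-- Pre_ excludes exactly the inputs on which the Python raises: center missing from pos
-- or a witness missing from pos (ValueError), or n = 0 with a nonempty witness list
-- (the sort key raises ZeroDivisionError; with no witnesses the key is never called).
def Pre_angular_witness_order_from_positions_py (pos : List (Int × Int)) (n : Int) (center : Int) (witnesses : List Int) : Prop :=
  ((pos.find? (fun p => p.1 == center)).isSome = true) ∧
  (∀ w ∈ witnesses, (pos.find? (fun p => p.1 == w)).isSome = true) ∧
  (witnesses = [] ∨ n ≠ 0)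
instance (pos : List (Int × Int)) (n : Int) (center : Int) (witnesses : List Int) : Decidable (Pre_angular_witness_order_from_positions_py pos n center witnesses) := by unfold Pre_angular_witness_order_from_positions_py; infer_instance

def pvWitness_angular_witness_order_from_positions_py : (List (Int × Int)) × Int × Int × List Int :=
  ([(0, 0), (1, 1), (2, 2)], 3, 0, [2, 1, 2])

def Spec_angular_witness_order_from_positions_py (pos : List (Int × Int)) (n : Int) (center : Int) (witnesses : List Int) (out : List Int) : Prop := out = angular_witness_order_from_positions_py_alt pos n center witnesses
instance (pos : List (Int × Int)) (n : Int) (center : Int) (witnesses : List Int) (out : List Int) : Decidable (Spec_angular_witness_order_from_positions_py pos n center witnesses out) := by unfold Spec_angular_witness_order_from_positions_py; infer_instance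

-- ===== CLAIM (what is proved, stated in full; the proofs are below) =====
def Claim_equal_angular_witness_order_from_positions_py : Prop := ∀ (pos : List (Int × Int)) (n : Int) (center : Int) (witnesses : List Int), Dom_angular_witness_order_from_positions_py pos n center witnesses → Pre_angular_witness_order_from_positions_py pos n center witnesses → Spec_angular_witness_order_from_positions_py pos n center witnesses (angular_witness_order_from_positions_py pos n center witnesses)

-- ===== LEMMAS AND PROOFS =====

theorem lookupPos_eq_dictGet? (pos : List (Int × Int)) (x : Int) :
    lookupPos pos x = dictGet? pos x := by
  induction pos with
  | nil => rfl
  | cons p rest ih =>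
    obtain ⟨k, v⟩ := p
    by_cases h : k == x <;> simp [lookupPos, dictGet?, List.find?, h] <;>
      simpa [dictGet?] using ih

theorem bucketize_eq_foldl (key : Int → Int) (ws : List Int) (d : PySem.Dict Int (List Int)) :
    bucketize key ws d = ws.foldl (fun d w => d.modify (key w) [] (· ++ [w])) d := by
  induction ws generalizing d with
  | nil => rfl
  | cons w ws ih => simp [bucketize, ih]

theorem flattenBuckets_eq_flatMap (d : PySem.Dict Int (List Int)) (rs : List Int) :
    flattenBuckets d rs = rs.flatMap (fun r => d.getD r []) := by
  induction rs with
  | nil => rfl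
  | cons r rs ih => simp [flattenBuckets, ih]

theorem insertBy_cons {α : Type} (bef : α → α → Bool) (w y : α) (ys : List α) :
    PySem.List.insertBy bef w (y :: ys) =
      if bef w y then w :: y :: ys else y :: PySem.List.insertBy bef w ys := rfl

theorem insertBy_append_of_not {α : Type} (bef : α → α → Bool) (w : α)
    (seg rest : List α) (h : ∀ x ∈ seg, bef w x = false) :
    PySem.List.insertBy bef w (seg ++ rest) = seg ++ PySem.List.insertBy bef w rest := by
  induction seg with
  | nil => simp
  | cons y ys ih =>
    have hy : bef w y = false := h y (by simp)
    simp [insertBy_cons, hy, ih (fun x hx => h x (by simp [hx]))]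

theorem insertBy_of_all {α : Type} (bef : α → α → Bool) (w : α)
    (rest : List α) (h : ∀ x ∈ rest, bef w x = true) :
    PySem.List.insertBy bef w rest = w :: rest := by
  cases rest with
  | nil => rfl
  | cons y ys => simp [insertBy_cons, h y (by simp)]

/-- Inserting an element into a concatenation of strictly key-increasing buckets
appends it at the end of its own bucket. -/
theorem insertBy_flatMap {α : Type} (key : α → Int) (w : α) (G : Int → List α)
    (hG : ∀ v : Int, ∀ x ∈ G v, key x = v) :
    ∀ ks : List Int, ks.Pairwise (· < ·) → key w ∈ ks →
      PySem.List.insertBy (fun a b => decide (key a < key b)) w (ks.flatMap G)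
        = ks.flatMap (fun v => G v ++ if key w = v then [w] else []) := by
  intro ks
  induction ks with
  | nil => intro _ h; simp at h
  | cons v ks' ih =>
    intro hpw hmem
    have hvlt : ∀ v' ∈ ks', v < v' := (List.pairwise_cons.mp hpw).1
    have hpw' : ks'.Pairwise (· < ·) := (List.pairwise_cons.mp hpw).2
    by_cases hcase : key w = v
    · -- w belongs to the first bucket: skip it, then w precedes all later buckets
      have hseg : ∀ x ∈ G v, (fun a b => decide (key a < key b)) w x = false := by
        intro x hx; simp [hG v x hx, hcase]
      have hrest : ∀ x ∈ ks'.flatMap G, (fun a b => decide (key a < key b)) w x = true := by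
        intro x hx
        rcases List.mem_flatMap.mp hx with ⟨v', hv', hxv'⟩
        have := hG v' x hxv'
        simp [this, hcase]
        exact hvlt v' hv'
      have hnotin : ∀ v' ∈ ks', ¬ (key w = v') := by
        intro v' hv' he
        have := hvlt v' hv'
        omega
      have hrw : List.flatMap (fun v' => G v' ++ if key w = v' then [w] else []) ks'
          = List.flatMap G ks' := by
        apply List.flatMap_congr
        intro x hx
        simp [hnotin x hx]
      simp only [List.flatMap_cons]
      rw [insertBy_append_of_not _ _ _ _ hseg, insertBy_of_all _ _ _ hrest, hrw]
      simp [hcase]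
    · -- w belongs to a later bucket
      have hmem' : key w ∈ ks' := by
        rcases List.mem_cons.mp hmem with h | h
        · exact absurd h hcase
        · exact h
      have hseg : ∀ x ∈ G v, (fun a b => decide (key a < key b)) w x = false := by
        intro x hx
        have hx' := hG v x hx
        have : v < key w := hvlt _ hmem'
        simp [hx']; omega
      simp only [List.flatMap_cons]
      rw [insertBy_append_of_not _ _ _ _ hseg, ih hpw' hmem']
      simp [hcase]

/-- A stable sort by an integer key equals the concatenation, over the strictly
increasing list of keys, of the key-classes in original order. -/
theorem sorted_eq_flatMap_filter {α : Type} (key : α → Int) (ks : List Int)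
    (hks : ks.Pairwise (· < ·)) :
    ∀ ws : List α, (∀ w ∈ ws, key w ∈ ks) →
      PySem.List.sorted ws key
        = ks.flatMap (fun v => ws.filter (fun w => key w == v)) := by
  intro ws
  induction ws using List.reverseRecOn with
  | nil => simp [PySem.List.sorted_eq_foldl_insertBy]
  | append_singleton ws w ih =>
    intro hmem
    have hmem' : ∀ x ∈ ws, key x ∈ ks := fun x hx => hmem x (by simp [hx])
    have hw : key w ∈ ks := hmem w (by simp)
    rw [PySem.List.sorted_eq_foldl_insertBy, List.foldl_append, List.foldl_cons,
      List.foldl_nil, ← PySem.List.sorted_eq_foldl_insertBy, ih hmem',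
      insertBy_flatMap key w _ (by intro v x hx; simpa using (List.mem_filter.mp hx).2) ks hks hw]
    apply List.flatMap_congr
    intro v _
    by_cases h : key w = v <;> simp [List.filter_append, h]

/-- B's bucket construction, flattened over the sorted distinct keys, is exactly
the stable sort by that key. -/
theorem bucket_flatten_eq_sorted (keyf : Int → Int) (witnesses : List Int) :
    flattenBuckets (bucketize keyf witnesses PySem.Dict.empty)
        (PySem.List.sorted (bucketize keyf witnesses PySem.Dict.empty).keys (fun r => r))
    = PySem.List.sorted witnesses keyf := by
  rw [bucketize_eq_foldl, flattenBuckets_eq_flatMap]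
  set D := witnesses.foldl (fun d w => d.modify (keyf w) ([] : List Int) (· ++ [w])) PySem.Dict.empty with hD
  have hkeys : D.keys = PySem.Set.ofList (witnesses.map keyf) := by
    rw [hD]
    have h := PySem.Dict.keys_foldl_modify_key (ν := List Int) witnesses keyf []
      (fun _ w => (· ++ [w])) PySem.Dict.empty
    simpa [PySem.Set.update_eq_append_filter] using h
  have hgetD : ∀ r : Int, D.getD r [] = witnesses.filter (fun w => keyf w == r) := by
    intro r
    have h1 : D = (witnesses.map (fun w => (keyf w, w))).foldl
        (fun d p => d.modify p.1 [] (· ++ [p.2])) PySem.Dict.empty := by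
      rw [hD, List.foldl_map]
    rw [h1, PySem.Dict.getD_foldl_modify_append]
    simp [List.filter_map, Function.comp_def]
  rw [hkeys]
  have hks := PySem.List.sorted_ofList_pairwise_lt (witnesses.map keyf)
  rw [sorted_eq_flatMap_filter keyf (PySem.List.sorted (PySem.Set.ofList (witnesses.map keyf)) (fun x => x))
    hks witnesses (by
      intro w hw
      rw [PySem.List.mem_sorted]
      exact (PySem.Set.mem_ofList _ _).mpr (List.mem_map_of_mem hw))]
  apply List.flatMap_congr
  intro v _
  exact hgetD v

-- ===== VERDICT (by name: the statement is the Claim_ definition above) =====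
theorem angular_witness_order_from_positions_py_spec : Claim_equal_angular_witness_order_from_positions_py := by
  intro pos n center witnesses _ _
  unfold Spec_angular_witness_order_from_positions_py
  unfold angular_witness_order_from_positions_py angular_witness_order_from_positions_py_alt
  simp only [lookupPos_eq_dictGet?]
  cases hc : dictGet? pos center with
  | none => rfl
  | some center_pos =>
    by_cases hmiss : witnesses.any (fun w => (dictGet? pos w).isNone)
    · have hne : witnesses.filter (fun w => (dictGet? pos w).isNone) ≠ [] := by
        rcases List.any_eq_true.mp hmiss with ⟨w, hw, hpw⟩
        exact List.ne_nil_of_mem (List.mem_filter.mpr ⟨hw, hpw⟩)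
      simp [hne, hmiss]
    · have hfe : witnesses.filter (fun w => (dictGet? pos w).isNone) = [] := by
        rw [List.filter_eq_nil_iff]
        intro w hw
        have := List.any_eq_false.mp (Bool.eq_false_iff.mpr hmiss) w hw
        simpa using this
      simp only [hfe, hmiss, ne_eq, not_true_eq_false, not_false_eq_true, if_neg]
      rw [bucket_flatten_eq_sorted]
      simp
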